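-- pv_equiv track=rewrite | github.com/kyuwon-shim-ARL/academic-investigator | src/academic_investigator/modes/conference.py | _classify_speaker_type
-- ===== SOURCE A (Python) =====
-- INDUSTRY_SUFFIXES = (
--     "\u321c",  # ㈜ (Parenthesized Hangul Stock -- Korean incorporated)
--     "Inc", "Corp", "Ltd", "GmbH", "Co.", "LLC", "Inc.", "Corp.", "Ltd.",
-- )
--
-- def _classify_speaker_type(
--     affiliation: str, speakers_summary: dict | None = None
-- ) -> str:
--     """Classify a speaker as academic, industry, or research_institute.
--
--     Uses speakers_summary for pre-classification if available, then
--     falls back to affiliation heuristics.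
--     """
--     # Check speakers_summary first
--     if speakers_summary:
--         # Check industry list
--         for entry in speakers_summary.get("industry", []):
--             aff = entry.get("affiliation", "")
--             if aff and aff == affiliation:
--                 return "industry"
--         # Check research_institutes list
--         for entry in speakers_summary.get("research_institutes", []):
--             aff = entry.get("affiliation", "")
--             if aff and aff == affiliation:
--                 return "research_institute"
--         # Check academic list
--         for entry in speakers_summary.get("academic", []):
--             aff = entry.get("affiliation", "")
--             if aff and aff == affiliation:
--                 return "academic"
--
--     # Affiliation-based heuristics
--     if not affiliation:
--         return "academic"
--
--     # Check industry suffixes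
--     for suffix in INDUSTRY_SUFFIXES:
--         if suffix in affiliation:
--             return "industry"
--
--     return "academic"
-- ===== SOURCE B (Python) =====
-- INDUSTRY_SUFFIXES = (
--     "\u321c",
--     "Inc", "Corp", "Ltd", "GmbH", "Co.", "LLC", "Inc.", "Corp.", "Ltd.",
-- )
--
-- def _classify_speaker_type(
--     affiliation: str, speakers_summary: dict | None = None
-- ) -> str:
--     """Classify a speaker via a single affiliation->type table, then heuristics."""
--     summary = speakers_summary or {}
--     # Build the table in reverse precedence order: industry overwrites on duplicates.
--     table = {}
--     for category, label in (
--         ("academic", "academic"),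
--         ("research_institutes", "research_institute"),
--         ("industry", "industry"),
--     ):
--         for entry in summary.get(category, []):
--             aff = entry.get("affiliation", "")
--             if aff:
--                 table[aff] = label
--     if affiliation in table:
--         return table[affiliation]
--     if not affiliation:
--         return "academic"
--     if any(s in affiliation for s in INDUSTRY_SUFFIXES):
--         return "industry"
--     return "academic"
-- ===== Notes on version B (the rewrite author's own statement) =====
-- stated objective: simpler
-- what changed: Replaces A's three separate precedence-ordered scans over the summary lists by building one affiliation-to-type dict in reverse precedence order (academic, research_institutes, then industry so industry overwrites, skipping empty affiliations) followed by a single lookup; the suffix fallback becomes an any() over the suffix tuple.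
import Mathlib
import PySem

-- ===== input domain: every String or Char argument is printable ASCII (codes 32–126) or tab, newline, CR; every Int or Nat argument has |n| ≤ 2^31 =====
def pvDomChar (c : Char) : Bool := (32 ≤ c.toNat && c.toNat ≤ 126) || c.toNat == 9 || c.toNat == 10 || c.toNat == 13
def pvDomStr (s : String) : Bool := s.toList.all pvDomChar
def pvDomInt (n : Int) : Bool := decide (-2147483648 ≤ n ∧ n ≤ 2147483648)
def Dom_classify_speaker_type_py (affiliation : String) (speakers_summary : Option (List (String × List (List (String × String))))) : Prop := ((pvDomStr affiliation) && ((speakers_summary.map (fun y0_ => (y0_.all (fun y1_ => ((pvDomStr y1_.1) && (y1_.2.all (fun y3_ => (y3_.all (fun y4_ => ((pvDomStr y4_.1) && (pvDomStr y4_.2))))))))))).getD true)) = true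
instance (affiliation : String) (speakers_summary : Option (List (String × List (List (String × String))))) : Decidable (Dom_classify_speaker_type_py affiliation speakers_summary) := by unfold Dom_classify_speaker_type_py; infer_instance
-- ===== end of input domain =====

-- B replaces A's three precedence-ordered scans by one affiliation→type table built in
-- reverse precedence order (industry inserted last, overwriting) followed by a single lookup (objective: simpler).

-- ===== PORT A =====
def pvIndustrySuffixes : List String :=
  ["㈜", "Inc", "Corp", "Ltd", "GmbH", "Co.", "LLC", "Inc.", "Corp.", "Ltd."]

-- entry.get("affiliation", "")
def pvEntryAff (e : List (String × String)) : String :=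
  (PySem.Dict.mk e).getD "affiliation" ""

-- A's 'for entry in …: if aff and aff == affiliation: return <label>' loop (returns whether it hits)
def pvScanA (affiliation : String) : List (List (String × String)) → Bool
  | [] => false
  | e :: rest =>
      let aff := pvEntryAff e
      if aff ≠ "" ∧ aff = affiliation then true else pvScanA affiliation rest

-- A's 'for suffix in INDUSTRY_SUFFIXES: if suffix in affiliation: return "industry"' loop
def pvSuffixScanA (affiliation : String) : List String → Bool
  | [] => false
  | s :: rest => if PySem.Str.isIn s affiliation then true else pvSuffixScanA affiliation rest

def classify_speaker_type_py (affiliation : String) (speakers_summary : Option (List (String × List (List (String × String))))) : String :=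
  let pre : Option String :=
    match speakers_summary with
    | some d =>
        if d.isEmpty then none  -- 'if speakers_summary:' — empty dict is falsy
        else if pvScanA affiliation ((PySem.Dict.mk d).getD "industry" []) then some "industry"
        else if pvScanA affiliation ((PySem.Dict.mk d).getD "research_institutes" []) then some "research_institute"
        else if pvScanA affiliation ((PySem.Dict.mk d).getD "academic" []) then some "academic"
        else none
    | none => none
  match pre with
  | some r => r
  | none =>
      if affiliation = "" then "academic"
      else if pvSuffixScanA affiliation pvIndustrySuffixes then "industry"
      else "academic"

-- ===== PORT B =====
-- 'for entry in summary.get(cat, []): if aff: table[aff] = label'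
def pvAddCat (table : PySem.Dict String String) (summary : List (String × List (List (String × String)))) (cat label : String) : PySem.Dict String String :=
  ((PySem.Dict.mk summary).getD cat []).foldl
    (fun t e =>
      let aff := pvEntryAff e
      if aff ≠ "" then t.insert aff label else t)
    table

def classify_speaker_type_py_alt (affiliation : String) (speakers_summary : Option (List (String × List (List (String × String))))) : String :=
  let summary := speakers_summary.getD []   -- speakers_summary or {}
  let table :=
    pvAddCat (pvAddCat (pvAddCat PySem.Dict.empty summary "academic" "academic")
        summary "research_institutes" "research_institute")
      summary "industry" "industry"
  match table.get? affiliation with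
  | some r => r
  | none =>
      if affiliation = "" then "academic"
      else if pvIndustrySuffixes.any (fun s => PySem.Str.isIn s affiliation) then "industry"
      else "academic"

-- ===== PRECONDITION & SPEC =====
def Spec_classify_speaker_type_py (affiliation : String) (speakers_summary : Option (List (String × List (List (String × String))))) (out : String) : Prop := out = classify_speaker_type_py_alt affiliation speakers_summary
instance (affiliation : String) (speakers_summary : Option (List (String × List (List (String × String))))) (out : String) : Decidable (Spec_classify_speaker_type_py affiliation speakers_summary out) := by unfold Spec_classify_speaker_type_py; infer_instance

-- ===== CLAIM (what is proved, stated in full; the proofs are below) =====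
def Claim_equal_classify_speaker_type_py : Prop := ∀ (affiliation : String) (speakers_summary : Option (List (String × List (List (String × String))))), Dom_classify_speaker_type_py affiliation speakers_summary → Spec_classify_speaker_type_py affiliation speakers_summary (classify_speaker_type_py affiliation speakers_summary)

-- ===== LEMMAS AND PROOFS =====

-- looking up k after one category's insert loop: some label iff A's scan hits that category, else the old table
theorem get?_catFold (k label : String) (entries : List (List (String × String))) (t : PySem.Dict String String) :
    (entries.foldl
        (fun t e =>
          let aff := pvEntryAff e
          if aff ≠ "" then t.insert aff label else t)
        t).get? k
      = if pvScanA k entries then some label else t.get? k := by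
  induction entries generalizing t with
  | nil => simp [pvScanA]
  | cons e rest ih =>
      simp only [List.foldl_cons, pvScanA, ih]
      by_cases hrest : pvScanA k rest = true
      · simp [hrest]
      · simp only [Bool.not_eq_true] at hrest
        by_cases haff : pvEntryAff e = ""
        · simp [haff, hrest]
        · by_cases hk : pvEntryAff e = k
          · subst hk
            simp [haff, hrest, PySem.Dict.get?_insert_self]
          · have hne : ¬ (k = pvEntryAff e) := fun h => hk h.symm
            simp [haff, hk, hrest, hne, PySem.Dict.get?_insert]

theorem get?_pvAddCat (k : String) (table : PySem.Dict String String)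
    (summary : List (String × List (List (String × String)))) (cat label : String) :
    (pvAddCat table summary cat label).get? k
      = if pvScanA k ((PySem.Dict.mk summary).getD cat []) then some label else table.get? k := by
  unfold pvAddCat
  exact get?_catFold k label _ table

theorem suffixScan_eq_any (affiliation : String) (l : List String) :
    pvSuffixScanA affiliation l = l.any (fun s => PySem.Str.isIn s affiliation) := by
  induction l with
  | nil => rfl
  | cons s rest ih =>
      simp only [pvSuffixScanA, List.any_cons, ← ih]
      by_cases h : PySem.Str.isIn s affiliation = true <;> simp_all

-- ===== VERDICT (by name: the statement is the Claim_ definition above) =====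
theorem classify_speaker_type_py_spec : Claim_equal_classify_speaker_type_py := by
  intro affiliation ss _
  unfold Spec_classify_speaker_type_py classify_speaker_type_py classify_speaker_type_py_alt
  rw [suffixScan_eq_any]
  cases ss with
  | none =>
      simp only [Option.getD_none, get?_pvAddCat]
      simp [pvScanA, PySem.Dict.getD, PySem.Dict.get?, PySem.Dict.empty]
  | some d =>
      simp only [Option.getD_some, get?_pvAddCat, PySem.Dict.get?_empty]
      by_cases hd : d.isEmpty
      · have : d = [] := List.isEmpty_iff.mp hd
        subst this
        simp [pvScanA, PySem.Dict.getD, PySem.Dict.get?]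
      · simp only [hd]
        split_ifs <;> simp_all
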